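-- pv_equiv track=rewrite | github.com/snyke7/aoc2023 | aoc2015/day19.py | find_shortest_path_to
-- ===== SOURCE A (Python) =====
-- def mutate_with_reps(base, replacements):
--     result = set()
--     for to_rep, rep_with in replacements:
--         start_idx = 0
--         while to_rep in base[start_idx:]:
--             occ_idx = base.index(to_rep, start_idx)
--             to_add = base[:occ_idx] + rep_with + base[occ_idx + len(to_rep):]
--             result.add(to_add)
--             start_idx = occ_idx + 1
--     return result
--
-- def find_shortest_path_to(reps, dest):
--     result = {'e': 0}
--     new_els = ['e']
--     while new_els:
--         el = new_els.pop(0)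
--         num_reps = result[el]
--         for rep in mutate_with_reps(el, reps):
--             if len(rep) > len(dest):
--                 continue
--             if rep in result and result[rep] <= num_reps + 1:
--                 continue
--             result[rep] = num_reps + 1
--             new_els.append(rep)
--     return result[dest]
-- ===== SOURCE B (Python) =====
-- def mutate_with_reps(base, replacements):
--     result = set()
--     for to_rep, rep_with in replacements:
--         start_idx = 0
--         while to_rep in base[start_idx:]:
--             occ_idx = base.index(to_rep, start_idx)
--             to_add = base[:occ_idx] + rep_with + base[occ_idx + len(to_rep):]
--             result.add(to_add)
--             start_idx = occ_idx + 1
--     return result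
--
-- def find_shortest_path_to(reps, dest):
--     # level-synchronous BFS: expand whole frontier per round instead of a FIFO queue
--     dist = {'e': 0}
--     frontier = {'e'}
--     step = 0
--     while frontier:
--         step += 1
--         nxt = {rep for el in frontier for rep in mutate_with_reps(el, reps)
--                if len(rep) <= len(dest) and rep not in dist}
--         for m in nxt:
--             dist[m] = step
--         frontier = nxt
--     return dist[dest]
-- ===== Notes on version B (the rewrite author's own statement) =====
-- stated objective: alternative
-- what changed: A's single FIFO-queue BFS loop (pop one molecule, re-check and update the dist dict per neighbour, append discoveries to the shared queue) is replaced by a level-synchronous BFS: a whole-frontier set is expanded each round into the next frontier set and every newly discovered molecule gets distance = round number.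
import Mathlib
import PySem

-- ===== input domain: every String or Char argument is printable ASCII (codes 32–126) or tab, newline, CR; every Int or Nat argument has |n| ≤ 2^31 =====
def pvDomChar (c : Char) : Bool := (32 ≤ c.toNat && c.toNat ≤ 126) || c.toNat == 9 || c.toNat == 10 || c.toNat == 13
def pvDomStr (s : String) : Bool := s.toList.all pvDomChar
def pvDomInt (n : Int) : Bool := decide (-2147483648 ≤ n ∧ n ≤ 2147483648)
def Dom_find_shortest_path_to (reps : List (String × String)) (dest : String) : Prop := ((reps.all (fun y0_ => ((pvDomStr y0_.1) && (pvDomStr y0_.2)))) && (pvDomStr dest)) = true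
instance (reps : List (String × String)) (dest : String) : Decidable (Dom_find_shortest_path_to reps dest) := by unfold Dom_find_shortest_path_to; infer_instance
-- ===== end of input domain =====

-- B replaces A's single FIFO-queue BFS loop by a level-synchronous BFS (whole-frontier rounds); same
-- return value; A=B is proved for ALL inputs, Pre_ only excludes the inputs where the Python A raises.

-- ===== PORT A =====

-- ---------------------------------------------------------------------------
-- Termination infrastructure for the two while-loops (cited by the ports'
-- decreasing_by; nothing here changes the computed values).
-- ---------------------------------------------------------------------------

/-- injective base-1114113 encoding of a string (digits `c.toNat + 1 ≤ 1114112`). -/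
def pvEnc : List Char → Nat
  | [] => 0
  | c :: t => (c.toNat + 1) + 1114113 * pvEnc t

theorem pvChar_lt (c : Char) : c.toNat < 1114112 := by
  rcases c.valid with h | ⟨h1, h2⟩ <;> unfold Char.toNat <;> omega

theorem pvEnc_add_one_le (l : List Char) : pvEnc l + 1 ≤ 1114113 ^ l.length := by
  induction l with
  | nil => simp [pvEnc]
  | cons c t ih =>
    have hc := pvChar_lt c
    have : 1114113 ^ (c :: t).length = 1114113 * 1114113 ^ t.length := by
      rw [List.length_cons, pow_succ, Nat.mul_comm]
    rw [this, pvEnc]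
    nlinarith [ih]

theorem pvEnc_inj : ∀ s t : List Char, pvEnc s = pvEnc t → s = t := by
  intro s
  induction s with
  | nil =>
    intro t h
    cases t with
    | nil => rfl
    | cons c u => simp [pvEnc] at h; omega
  | cons c u ih =>
    intro t h
    cases t with
    | nil => simp [pvEnc] at h
    | cons b v =>
      simp only [pvEnc] at h
      have hc := pvChar_lt c
      have hb := pvChar_lt b
      have h1 : c.toNat = b.toNat ∧ pvEnc u = pvEnc v := by omega
      have hcb : c = b := by
        have := congrArg Char.ofNat h1.1
        rwa [Char.ofNat_toNat, Char.ofNat_toNat] at this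
      rw [hcb, ih v h1.2]

/-- length cap for every molecule the search stores ('e' has length 1). -/
def pvM (dest : String) : Nat := max dest.toList.length 1

/-- strict upper bound on the number of distinct molecules of length ≤ pvM dest. -/
def pvN (dest : String) : Nat := 1114113 ^ pvM dest

/-- keys are distinct and short: enough to bound the dictionary's size. -/
def pvKInv (dest : String) (d : PySem.Dict String Int) : Prop :=
  d.keys.Nodup ∧ ∀ k ∈ d.keys, k.toList.length ≤ pvM dest

theorem pvSize_le (dest : String) (d : PySem.Dict String Int) (h : pvKInv dest d) :
    d.size ≤ pvN dest := by
  obtain ⟨hnd, hlen⟩ := h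
  have hsz : d.size = d.keys.length := by
    simp [PySem.Dict.size, PySem.Dict.keys]
  have hmapnd : (d.keys.map (fun k => pvEnc k.toList)).Nodup := by
    refine hnd.map_on ?_
    intro x _ y _ hxy
    have := pvEnc_inj x.toList y.toList hxy
    exact String.toList_inj.mp this
  have hsub : (d.keys.map (fun k => pvEnc k.toList)).toFinset ⊆ Finset.range (pvN dest) := by
    intro n hn
    simp only [List.mem_toFinset, List.mem_map] at hn
    obtain ⟨k, hk, rfl⟩ := hn
    have h1 := pvEnc_add_one_le k.toList
    have h2 : (1114113:Nat) ^ k.toList.length ≤ pvN dest :=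
      Nat.pow_le_pow_right (by norm_num) (hlen k hk)
    simp only [Finset.mem_range]
    omega
  have hcard := Finset.card_le_card hsub
  rw [Finset.card_range, List.toFinset_card_of_nodup hmapnd, List.length_map] at hcard
  omega

/-- lexicographic-style Nat measure for A's loop: dictionary part. -/
def pvMu (dest : String) (d : PySem.Dict String Int) : Nat :=
  (pvN dest - d.size) * (pvN dest + 2) + (d.values.map Int.toNat).sum

/-- full invariant carried by A's loop for termination. -/
def pvAInv (dest : String) (d : PySem.Dict String Int) : Prop :=
  pvKInv dest d ∧ ∀ v ∈ d.values, 0 ≤ v ∧ v.toNat ≤ d.size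

theorem pv_get?_mem_values {d : PySem.Dict String Int} {k : String} {v : Int}
    (h : d.get? k = some v) : v ∈ d.values := by
  simp only [PySem.Dict.get?, Option.map_eq_some_iff] at h
  obtain ⟨p, hp, rfl⟩ := h
  exact List.mem_map_of_mem (List.mem_of_find?_eq_some hp)

theorem pvGetD_facts (dest : String) (d : PySem.Dict String Int) (h : pvAInv dest d) (k : String) :
    0 ≤ d.getD k 0 ∧ (d.getD k 0).toNat ≤ d.size := by
  rw [PySem.Dict.getD_eq_get?_getD]
  cases hg : d.get? k with
  | none => simp
  | some v => simpa using h.2 v (pv_get?_mem_values hg)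

-- ---------------------------------------------------------------------------
-- shared helper: port of mutate_with_reps (used verbatim by both Pythons)
-- ---------------------------------------------------------------------------

-- inner `while to_rep in base[start_idx:]` loop of mutate_with_reps;
-- string slicing/concatenation is transcribed on toList (exact: Python str ops are List Char ops here).
def pvMutLoop (base sub repw : List Char) (acc : PySem.Set String) (start : Nat) : PySem.Set String :=
  if PySem.Chars.isIn sub (List.drop start base) = true then
    -- occ_idx = base.index(to_rep, start_idx)
    if hocc : (start : Int) ≤ PySem.Chars.findFrom base sub (start : Int) none ∧ start ≤ base.length then
      pvMutLoop base sub repw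
        (PySem.Set.add acc (String.ofList
          (List.take (PySem.Chars.findFrom base sub (start : Int) none).toNat base ++ repw ++
           List.drop ((PySem.Chars.findFrom base sub (start : Int) none).toNat + sub.length) base)))
        ((PySem.Chars.findFrom base sub (start : Int) none).toNat + 1)
    else acc
  else acc
termination_by base.length + 1 - start
decreasing_by omega

def mutate_with_reps (base : String) (replacements : List (String × String)) : PySem.Set String :=
  replacements.foldl (fun res p => pvMutLoop base.toList p.1.toList p.2.toList res 0) PySem.Set.empty

-- ---------------------------------------------------------------------------
-- PORT A: FIFO-queue BFS
-- ---------------------------------------------------------------------------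

-- body of A's `for rep in mutate_with_reps(el, reps)` loop (state: result dict, queue)
def pvStepA (dest : String) (c : Int) (st : PySem.Dict String Int × List String) (rep : String) :
    PySem.Dict String Int × List String :=
  if PySem.Str.len rep > PySem.Str.len dest then st
  else if st.1.contains rep = true ∧ st.1.getD rep 0 ≤ c then st
  else (st.1.insert rep c, st.2 ++ [rep])

theorem pvSumOverwrite (rep : String) (c v0 : Int) :
    ∀ l : List (String × Int), (l.map Prod.fst).Nodup → (rep, v0) ∈ l →
    ((l.map (fun p => if p.1 == rep then (rep, c) else p)).map (fun p => p.2.toNat)).sum + v0.toNat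
      = (l.map (fun p => p.2.toNat)).sum + c.toNat := by
  intro l
  induction l with
  | nil => simp
  | cons p t ih =>
    intro hnd hmem
    simp only [List.map_cons] at hnd
    have hnd' := List.nodup_cons.mp hnd
    rcases List.mem_cons.mp hmem with heq | hmem'
    · have hp : p = (rep, v0) := heq.symm
      subst hp
      have htid : t.map (fun p => if p.1 == rep then (rep, c) else p) = t := by
        calc t.map (fun p => if p.1 == rep then (rep, c) else p) = t.map id := by
              apply List.map_congr_left
              intro q hq
              have hq1 : q.1 ≠ rep := by
                intro h
                exact hnd'.1 (show (rep,v0).1 ∈ _ by show rep ∈ _; rw [← h]; exact List.mem_map_of_mem (f := Prod.fst) hq)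
              simp [hq1]
          _ = t := List.map_id t
      simp only [List.map_cons, List.sum_cons, htid]
      have : (((rep, v0).1 == rep) = true) := by simp
      rw [if_pos this]
      simp; omega
    · have hne : p.1 ≠ rep := by
        intro h
        rw [h] at hnd'
        exact hnd'.1 (List.mem_map_of_mem (f := Prod.fst) hmem')
      have hf : ¬ ((p.1 == rep) = true) := by simpa using hne
      simp only [List.map_cons, List.sum_cons]
      rw [if_neg hf]
      have := ih hnd'.2 hmem'
      omega

theorem pvStepA_facts (dest : String) (c : Int) (st : PySem.Dict String Int × List String) (rep : String)
    (h : pvAInv dest st.1) (hc0 : 0 ≤ c) (hc : c.toNat ≤ st.1.size + 1) :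
    pvAInv dest (pvStepA dest c st rep).1 ∧
    st.1.size ≤ (pvStepA dest c st rep).1.size ∧
    pvMu dest (pvStepA dest c st rep).1 ≤ pvMu dest st.1 ∧
    (pvStepA dest c st rep = st ∨ pvMu dest (pvStepA dest c st rep).1 < pvMu dest st.1) := by
  unfold pvStepA
  split
  · exact ⟨h, le_refl _, le_refl _, Or.inl rfl⟩
  split
  · exact ⟨h, le_refl _, le_refl _, Or.inl rfl⟩
  rename_i hlen hnot
  by_cases hco : st.1.contains rep = true
  · -- existing key with strictly larger stored value: overwrite (value sum strictly drops)
    have hv0 : ∃ v0, st.1.get? rep = some v0 := by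
      have := PySem.Dict.contains_eq_isSome_get? st.1 rep
      rw [hco] at this
      exact Option.isSome_iff_exists.mp this.symm
    obtain ⟨v0, hv0⟩ := hv0
    have hgd : st.1.getD rep 0 = v0 := by
      rw [PySem.Dict.getD_eq_get?_getD, hv0]; rfl
    have hclt : c < v0 := by
      rcases not_and_or.mp hnot with h1 | h2
      · exact absurd hco h1
      · rw [hgd] at h2; omega
    have hv0b := h.2 v0 (pv_get?_mem_values hv0)
    have hsz : (st.1.insert rep c).size = st.1.size := by
      rw [PySem.Dict.size_insert, if_pos hco]
    have hkeys : (st.1.insert rep c).keys = st.1.keys := PySem.Dict.keys_insert_of_contains st.1 c hco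
    have hInv' : pvAInv dest (st.1.insert rep c) := by
      refine ⟨⟨?_, ?_⟩, ?_⟩
      · rw [hkeys]; exact h.1.1
      · rw [hkeys]; exact h.1.2
      · intro w hw
        rcases PySem.Dict.mem_values_insert st.1 rep c w hw with rfl | hwold
        · constructor
          · exact hc0
          · rw [hsz]; omega
        · have := h.2 w hwold; rw [hsz]; omega
    have hnodup_fst : (st.1.items.map Prod.fst).Nodup := by
      have := h.1.1; simpa [PySem.Dict.keys] using this
    have hmemitems : (rep, v0) ∈ st.1.items := PySem.Dict.mem_items_of_get?_eq_some st.1 hv0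
    have hsum := pvSumOverwrite rep c v0 st.1.items hnodup_fst hmemitems
    have hitems := PySem.Dict.items_insert_of_contains st.1 c hco
    have hsum' : ((st.1.insert rep c).values.map Int.toNat).sum + v0.toNat
        = (st.1.values.map Int.toNat).sum + c.toNat := by
      simp only [PySem.Dict.values, hitems, List.map_map]
      simpa [Function.comp] using hsum
    have hmu : pvMu dest (st.1.insert rep c) < pvMu dest st.1 := by
      unfold pvMu
      rw [hsz]
      have hcv : c.toNat < v0.toNat := by omega
      omega
    exact ⟨hInv', by show st.1.size ≤ (st.1.insert rep c).size; omega, le_of_lt hmu, Or.inr hmu⟩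
  · -- fresh key: size grows
    have hcof : st.1.contains rep = false := by
      cases hx : st.1.contains rep
      · rfl
      · exact absurd hx hco
    have hsz : (st.1.insert rep c).size = st.1.size + 1 := by
      rw [PySem.Dict.size_insert, if_neg hco]
    have hkeys := PySem.Dict.keys_insert_of_not_contains st.1 c hcof
    have hreplen : rep.toList.length ≤ pvM dest := by
      rw [not_lt] at hlen
      rw [PySem.Str.len_eq, PySem.Str.len_eq] at hlen
      have : rep.toList.length ≤ dest.toList.length := by exact_mod_cast hlen
      unfold pvM
      omega
    have hInv' : pvAInv dest (st.1.insert rep c) := by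
      refine ⟨⟨PySem.Dict.nodup_keys_insert _ _ _ h.1.1, ?_⟩, ?_⟩
      · intro k hk
        rcases (PySem.Dict.mem_keys_insert st.1 rep k c).mp hk with rfl | hkold
        · exact hreplen
        · exact h.1.2 k hkold
      · intro w hw
        rcases PySem.Dict.mem_values_insert st.1 rep c w hw with rfl | hwold
        · exact ⟨hc0, by omega⟩
        · have := h.2 w hwold; omega
    have hszle : st.1.size + 1 ≤ pvN dest := by
      have := pvSize_le dest _ hInv'.1
      omega
    have hitems := PySem.Dict.items_insert_of_not_contains st.1 c hcof
    have hvals : (st.1.insert rep c).values = st.1.values ++ [c] := by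
      simp [PySem.Dict.values, hitems]
    have hmu : pvMu dest (st.1.insert rep c) < pvMu dest st.1 := by
      unfold pvMu
      rw [hsz, hvals]
      have hkey : (pvN dest - st.1.size) * (pvN dest + 2)
          = (pvN dest - (st.1.size + 1)) * (pvN dest + 2) + (pvN dest + 2) := by
        rw [show pvN dest - st.1.size = (pvN dest - (st.1.size + 1)) + 1 from by omega, Nat.succ_mul]
      rw [hkey]
      simp only [List.map_append, List.sum_append, List.map_cons, List.sum_cons, List.map_nil,
        List.sum_nil]
      omega
    exact ⟨hInv', by show st.1.size ≤ (st.1.insert rep c).size; omega, le_of_lt hmu, Or.inr hmu⟩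

theorem pvFoldA_facts (dest : String) (c : Int) (ms : List String) :
    ∀ st : PySem.Dict String Int × List String, pvAInv dest st.1 → 0 ≤ c → c.toNat ≤ st.1.size + 1 →
    pvAInv dest (ms.foldl (pvStepA dest c) st).1 ∧
    st.1.size ≤ (ms.foldl (pvStepA dest c) st).1.size ∧
    pvMu dest (ms.foldl (pvStepA dest c) st).1 ≤ pvMu dest st.1 ∧
    (ms.foldl (pvStepA dest c) st = st ∨ pvMu dest (ms.foldl (pvStepA dest c) st).1 < pvMu dest st.1) := by
  induction ms with
  | nil => intro st h hc0 hc; exact ⟨h, le_refl _, le_refl _, Or.inl rfl⟩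
  | cons m t ih =>
    intro st h hc0 hc
    obtain ⟨h1, h2, h3, h4⟩ := pvStepA_facts dest c st m h hc0 hc
    have hrec := ih (pvStepA dest c st m) h1 hc0 (by omega)
    simp only [List.foldl_cons]
    rcases h4 with heq | hlt
    · rw [heq] at hrec ⊢
      exact hrec
    · refine ⟨hrec.1, by omega, by omega, Or.inr (by omega)⟩

theorem pvAInv_init (dest : String) : pvAInv dest (PySem.Dict.mk [("e", 0)]) := by
  refine ⟨⟨?_, ?_⟩, ?_⟩
  · simp [PySem.Dict.keys]
  · intro k hk
    simp [PySem.Dict.keys] at hk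
    subst hk
    unfold pvM
    simp
  · intro v hv
    simp [PySem.Dict.values] at hv
    subst hv
    simp [PySem.Dict.size]

-- A's `while new_els:` loop; the carried hypothesis only feeds the termination measure.
def pvLoopA (reps : List (String × String)) (dest : String)
    (result : PySem.Dict String Int) (queue : List String) (hInv : pvAInv dest result) :
    PySem.Dict String Int :=
  match queue with
  | [] => result
  | el :: rest =>
    -- num_reps = result[el]  (el is always a stored key when Python runs this)
    let numReps := result.getD el 0
    have hg := pvGetD_facts dest result hInv el
    have hf := pvFoldA_facts dest (numReps + 1) (mutate_with_reps el reps) (result, rest) hInv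
      (by omega) (by show (numReps + 1).toNat ≤ result.size + 1; omega)
    pvLoopA reps dest ((mutate_with_reps el reps).foldl (pvStepA dest (numReps + 1)) (result, rest)).1
      ((mutate_with_reps el reps).foldl (pvStepA dest (numReps + 1)) (result, rest)).2 hf.1
termination_by (pvMu dest result, queue.length)
decreasing_by
  rcases hf.2.2.2 with heq | hlt
  · rw [heq]
    exact Prod.Lex.right _ (by simp)
  · exact Prod.Lex.left _ _ hlt

def find_shortest_path_to (reps : List (String × String)) (dest : String) : Int :=
  let result := pvLoopA reps dest (PySem.Dict.mk [("e", 0)]) ["e"] (pvAInv_init dest)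
  -- Python `return result[dest]` raises KeyError when dest was never reached; Pre_ excludes that
  ((result.get? dest).getD 0)

-- ===== PORT B =====

-- body of B's set comprehension: `if len(rep) <= len(dest) and rep not in dist: nxt.add(rep)`
def pvStepBInner (dest : String) (dist : PySem.Dict String Int) (acc : PySem.Set String) (rep : String) :
    PySem.Set String :=
  if PySem.Str.len rep ≤ PySem.Str.len dest ∧ dist.contains rep = false then PySem.Set.add acc rep
  else acc

def pvNext (reps : List (String × String)) (dest : String) (dist : PySem.Dict String Int)
    (frontier : PySem.Set String) : PySem.Set String :=
  frontier.foldl (fun acc el => (mutate_with_reps el reps).foldl (pvStepBInner dest dist) acc)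
    PySem.Set.empty

theorem pvStepBInner_fold_facts (dest : String) (dist : PySem.Dict String Int) (ms : List String) :
    ∀ acc : PySem.Set String, acc.Nodup →
      (∀ x ∈ acc, x.toList.length ≤ pvM dest ∧ dist.contains x = false) →
      (ms.foldl (pvStepBInner dest dist) acc).Nodup ∧
      ∀ x ∈ ms.foldl (pvStepBInner dest dist) acc,
        x.toList.length ≤ pvM dest ∧ dist.contains x = false := by
  induction ms with
  | nil => intro acc h1 h2; exact ⟨h1, h2⟩
  | cons m t ih =>
    intro acc h1 h2
    simp only [List.foldl_cons]
    unfold pvStepBInner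
    split
    · rename_i hcond
      refine ih _ (PySem.Set.nodup_add _ _ h1) ?_
      intro x hx
      rcases (PySem.Set.mem_add acc m x).mp hx with hxo | rfl
      · exact h2 x hxo
      · refine ⟨?_, hcond.2⟩
        have := hcond.1
        rw [PySem.Str.len_eq, PySem.Str.len_eq] at this
        have h3 : x.toList.length ≤ dest.toList.length := by exact_mod_cast this
        unfold pvM
        omega
    · exact ih _ h1 h2

theorem pvNext_facts (reps : List (String × String)) (dest : String) (dist : PySem.Dict String Int)
    (frontier : PySem.Set String) :
    (pvNext reps dest dist frontier).Nodup ∧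
    ∀ x ∈ pvNext reps dest dist frontier,
      x.toList.length ≤ pvM dest ∧ dist.contains x = false := by
  unfold pvNext
  generalize hacc : (PySem.Set.empty : PySem.Set String) = acc
  have h1 : (acc : List String).Nodup := by rw [← hacc]; exact List.nodup_nil
  have h2 : ∀ x ∈ acc, x.toList.length ≤ pvM dest ∧ dist.contains x = false := by
    rw [← hacc]; intro x hx; cases hx
  clear hacc
  induction frontier generalizing acc with
  | nil => exact ⟨h1, h2⟩
  | cons el t ih =>
    simp only [List.foldl_cons]
    have := pvStepBInner_fold_facts dest dist (mutate_with_reps el reps) acc h1 h2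
    exact ih _ this.1 this.2

theorem pvKInv_init (dest : String) : pvKInv dest (PySem.Dict.mk [("e", 0)]) :=
  ⟨(pvAInv_init dest).1.1, (pvAInv_init dest).1.2⟩

-- B's `while frontier:` loop (level-synchronous rounds); the carried hypothesis only
-- feeds the termination measure.
def pvLoopB (reps : List (String × String)) (dest : String) (dist : PySem.Dict String Int)
    (frontier : PySem.Set String) (step : Int) (h : pvKInv dest dist) : PySem.Dict String Int :=
  if hfr : frontier = [] then dist
  else
    let nxt := pvNext reps dest dist frontier
    have hn := pvNext_facts reps dest dist frontier
    have hkey : pvKInv dest (nxt.foldl (fun d m => d.insert m (step + 1)) dist) := by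
      constructor
      · exact PySem.Dict.nodup_keys_foldl_insert nxt (fun _ _ => step + 1) dist h.1
      · intro k hk
        rw [PySem.Dict.keys_foldl_insert nxt (fun _ _ => step + 1) dist] at hk
        rcases (PySem.Set.mem_update dist.keys nxt k).mp hk with hko | hkn
        · exact h.2 k hko
        · exact (hn.2 k hkn).1
    -- dist[m] = step + 1 for every m in nxt
    pvLoopB reps dest (nxt.foldl (fun d m => d.insert m (step + 1)) dist) nxt (step + 1) hkey
termination_by (pvN dest - dist.size) * 2 + (if frontier = [] then 0 else 1)
decreasing_by
  rw [if_neg hfr]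
  have hit := PySem.Dict.items_foldl_insert_fresh nxt (fun a => a) (fun _ => (step + 1 : Int)) dist
    (fun a ha => (hn.2 a ha).2) (by simpa using hn.1)
  simp only [] at hit
  have hsz : (nxt.foldl (fun d m => d.insert m (step + 1)) dist).size = dist.size + nxt.length := by
    simp only [PySem.Dict.size, hit, List.length_append, List.length_map]
  have hle := pvSize_le dest _ hkey
  rw [hsz] at hle
  simp only [show pvNext reps dest dist frontier = nxt from rfl]
  rw [hsz]
  rcases eq_or_ne nxt ([] : List String) with hnil | hnil
  · rw [if_pos hnil]
    have h0 : nxt.length = 0 := by rw [hnil]; rfl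
    omega
  · rw [if_neg hnil]
    have hlen : 1 ≤ nxt.length := List.length_pos_iff.mpr hnil
    omega

def find_shortest_path_to_alt (reps : List (String × String)) (dest : String) : Int :=
  let dist := pvLoopB reps dest (PySem.Dict.mk [("e", 0)]) (PySem.Set.ofList ["e"]) 0 (pvKInv_init dest)
  -- Python `return dist[dest]` raises KeyError when dest was never reached; Pre_ excludes that
  ((dist.get? dest).getD 0)

-- ===== PRECONDITION & SPEC =====

-- declarative one-step rewrites of s (replace one occurrence of a left side by its right side)
def pvRewrites (reps : List (String × String)) (s : List Char) : List (List Char) :=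
  reps.flatMap (fun p => (List.range (s.length + 1)).filterMap (fun i =>
    if p.1.toList ≠ [] ∧ p.1.toList.isPrefixOf (List.drop i s) = true
    then some (List.take i s ++ p.2.toList ++ List.drop (i + p.1.toList.length) s) else none))

-- saturation of the set of molecules reachable from 'e' through molecules of length ≤ L
-- (the fuel is a crude upper bound on the number of such molecules; the recursion stops
-- as soon as a round adds nothing, so evaluation is cheap)
def pvSat (reps : List (String × String)) (L : Nat) : Nat → PySem.Set (List Char) → PySem.Set (List Char)
  | 0, cur => cur
  | fuel + 1, cur =>
      let nxt := cur.foldl (fun acc s =>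
        PySem.Set.update acc ((pvRewrites reps s).filter (fun t => t.length ≤ L))) cur
      if nxt.length = cur.length then cur else pvSat reps L fuel nxt

-- Pre_ excludes exactly the inputs on which the Python A raises: a replacement rule with empty
-- left-hand side (ValueError from str.index) or a dest that is not reachable from 'e' through
-- molecules of length ≤ len(dest) (KeyError on result[dest]).
def Pre_find_shortest_path_to (reps : List (String × String)) (dest : String) : Prop :=
  (∀ p ∈ reps, p.1 ≠ "") ∧
  dest.toList ∈ pvSat reps dest.toList.length (pvN dest) [String.toList "e"]

instance (reps : List (String × String)) (dest : String) :
    Decidable (Pre_find_shortest_path_to reps dest) := by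
  unfold Pre_find_shortest_path_to; infer_instance

def pvWitness_find_shortest_path_to : (List (String × String)) × String := ([("e", "a")], "a")

def Spec_find_shortest_path_to (reps : List (String × String)) (dest : String) (out : Int) : Prop :=
  out = find_shortest_path_to_alt reps dest

instance (reps : List (String × String)) (dest : String) (out : Int) :
    Decidable (Spec_find_shortest_path_to reps dest out) := by
  unfold Spec_find_shortest_path_to; infer_instance

-- ===== CLAIM (what is proved, stated in full; the proofs are below) =====
def Claim_equal_find_shortest_path_to : Prop := ∀ (reps : List (String × String)) (dest : String), Dom_find_shortest_path_to reps dest → Pre_find_shortest_path_to reps dest → Spec_find_shortest_path_to reps dest (find_shortest_path_to reps dest)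

-- ===== LEMMAS AND PROOFS =====

theorem pvMutLoop_nodup (base sub repw : List Char) (acc : PySem.Set String) (start : Nat) :
    acc.Nodup → (pvMutLoop base sub repw acc start).Nodup := by
  induction acc, start using pvMutLoop.induct (base := base) (sub := sub) (repw := repw) with
  | case1 acc start hin hocc ih =>
    intro h
    rw [pvMutLoop, if_pos hin, dif_pos hocc]
    exact ih (PySem.Set.nodup_add _ _ h)
  | case2 acc start hin hocc =>
    intro h
    rw [pvMutLoop, if_pos hin, dif_neg hocc]
    exact h
  | case3 acc start hin =>
    intro h
    rw [pvMutLoop, if_neg hin]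
    exact h

theorem mutate_with_reps_nodup (base : String) (replacements : List (String × String)) :
    (mutate_with_reps base replacements).Nodup := by
  unfold mutate_with_reps
  generalize hacc : PySem.Set.empty = acc
  have h : (acc : List String).Nodup := by rw [← hacc]; exact List.nodup_nil
  clear hacc
  induction replacements generalizing acc with
  | nil => exact h
  | cons p t ih => exact ih _ (pvMutLoop_nodup _ _ _ _ _ h)


-- mathematical BFS layers: pvV = visited, pvF = frontier after d rounds
def pvNbrs (reps : List (String × String)) (dest : String) (a : String) : Finset String :=
  ((mutate_with_reps a reps).filter (fun r => decide (r.toList.length ≤ dest.toList.length))).toFinset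

def pvLayers (reps : List (String × String)) (dest : String) : Nat → Finset String × Finset String
  | 0 => ({"e"}, {"e"})
  | d + 1 =>
    let P := pvLayers reps dest d
    let F' := (P.2.biUnion (fun a => pvNbrs reps dest a)) \ P.1
    (P.1 ∪ F', F')

def pvV (reps : List (String × String)) (dest : String) (d : Nat) : Finset String :=
  (pvLayers reps dest d).1

def pvF (reps : List (String × String)) (dest : String) (d : Nat) : Finset String :=
  (pvLayers reps dest d).2

theorem pvF_succ (reps : List (String × String)) (dest : String) (d : Nat) :
    pvF reps dest (d + 1) = ((pvF reps dest d).biUnion (fun a => pvNbrs reps dest a)) \ pvV reps dest d := rfl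

theorem pvV_succ (reps : List (String × String)) (dest : String) (d : Nat) :
    pvV reps dest (d + 1) = pvV reps dest d ∪ pvF reps dest (d + 1) := rfl

theorem pvF_subset_V (reps : List (String × String)) (dest : String) (d : Nat) :
    pvF reps dest d ⊆ pvV reps dest d := by
  cases d with
  | zero => exact fun s hs => hs
  | succ d => rw [pvV_succ]; exact Finset.subset_union_right

theorem pvV_mono (reps : List (String × String)) (dest : String) (d : Nat) :
    pvV reps dest d ⊆ pvV reps dest (d + 1) := by
  rw [pvV_succ]; exact Finset.subset_union_left

theorem pvV_le_mono (reps : List (String × String)) (dest : String) {d e : Nat} (h : d ≤ e) :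
    pvV reps dest d ⊆ pvV reps dest e := by
  induction e with
  | zero => cases Nat.le_zero.mp h; exact fun s hs => hs
  | succ e ih =>
    by_cases hde : d ≤ e
    · exact fun s hs => pvV_mono reps dest e (ih hde hs)
    · have : d = e + 1 := by omega
      subst this
      exact fun s hs => hs

theorem pvV_mem_iff (reps : List (String × String)) (dest : String) (d : Nat) (s : String) :
    s ∈ pvV reps dest d ↔ ∃ j, j ≤ d ∧ s ∈ pvF reps dest j := by
  induction d with
  | zero =>
    constructor
    · intro h; exact ⟨0, le_refl _, h⟩
    · rintro ⟨j, hj, hs⟩; cases Nat.le_zero.mp hj; exact hs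
  | succ d ih =>
    rw [pvV_succ, Finset.mem_union, ih]
    constructor
    · rintro (⟨j, hj, hs⟩ | hs)
      · exact ⟨j, Nat.le_succ_of_le hj, hs⟩
      · exact ⟨d + 1, le_refl _, hs⟩
    · rintro ⟨j, hj, hs⟩
      by_cases h1 : j ≤ d
      · exact Or.inl ⟨j, h1, hs⟩
      · have : j = d + 1 := by omega
        subst this
        exact Or.inr hs

theorem pvF_empty_ge (reps : List (String × String)) (dest : String) {d : Nat}
    (h : pvF reps dest d = ∅) : ∀ j, d ≤ j → pvF reps dest j = ∅ := by
  intro j hj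
  induction j with
  | zero => cases Nat.le_zero.mp hj; exact h
  | succ j ih =>
    by_cases h1 : d ≤ j
    · rw [pvF_succ, ih h1]
      simp
    · have : d = j + 1 := by omega
      subst this
      exact h

theorem pvGet?_foldl_insert_const (v : Int) :
    ∀ (l : List String) (dist : PySem.Dict String Int) (k : String),
    (l.foldl (fun d m => d.insert m v) dist).get? k = if k ∈ l then some v else dist.get? k := by
  intro l
  induction l with
  | nil => intro dist k; simp
  | cons m t ih =>
    intro dist k
    simp only [List.foldl_cons]
    rw [ih]
    by_cases hk : k ∈ t
    · rw [if_pos hk, if_pos (List.mem_cons_of_mem m hk)]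
    · rw [if_neg hk, PySem.Dict.get?_insert]
      by_cases hkm : k = m
      · rw [if_pos hkm, if_pos (by rw [hkm]; exact List.mem_cons_self)]
      · rw [if_neg hkm, if_neg (by simp [hkm, hk])]

theorem pvStepBInner_fold_mem (dest : String) (dist : PySem.Dict String Int) :
    ∀ (ms : List String) (acc : PySem.Set String) (x : String),
    x ∈ ms.foldl (pvStepBInner dest dist) acc ↔
      x ∈ acc ∨ (x ∈ ms ∧ x.toList.length ≤ dest.toList.length ∧ dist.contains x = false) := by
  intro ms
  induction ms with
  | nil => intro acc x; simp
  | cons m t ih =>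
    intro acc x
    simp only [List.foldl_cons]
    rw [ih]
    unfold pvStepBInner
    constructor
    · rintro (hx | hx)
      · split at hx
        · rcases (PySem.Set.mem_add acc m x).mp hx with h1 | rfl
          · exact Or.inl h1
          · rename_i hcond
            refine Or.inr ⟨List.mem_cons_self, ?_, hcond.2⟩
            have := hcond.1
            rw [PySem.Str.len_eq, PySem.Str.len_eq] at this
            exact_mod_cast this
        · exact Or.inl hx
      · exact Or.inr ⟨List.mem_cons_of_mem m hx.1, hx.2⟩
    · rintro (hx | ⟨hmem, hlen, hcon⟩)
      · left
        split
        · exact (PySem.Set.mem_add acc m x).mpr (Or.inl hx)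
        · exact hx
      · rcases List.mem_cons.mp hmem with rfl | hxt
        · left
          rw [if_pos ⟨by rw [PySem.Str.len_eq, PySem.Str.len_eq]; exact_mod_cast hlen, hcon⟩]
          exact (PySem.Set.mem_add acc x x).mpr (Or.inr rfl)
        · exact Or.inr ⟨hxt, hlen, hcon⟩

theorem pvNext_fold_mem (reps : List (String × String)) (dest : String)
    (dist : PySem.Dict String Int) :
    ∀ (fr : List String) (acc : PySem.Set String) (x : String),
    x ∈ fr.foldl (fun acc el => (mutate_with_reps el reps).foldl (pvStepBInner dest dist) acc) acc ↔
      x ∈ acc ∨ ∃ el ∈ fr, x ∈ mutate_with_reps el reps ∧ x.toList.length ≤ dest.toList.length ∧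
        dist.contains x = false := by
  intro fr
  induction fr with
  | nil => intro acc x; simp
  | cons el t ih =>
    intro acc x
    simp only [List.foldl_cons]
    rw [ih, pvStepBInner_fold_mem]
    constructor
    · rintro ((hx | hx) | ⟨e, he, h⟩)
      · exact Or.inl hx
      · exact Or.inr ⟨el, List.mem_cons_self, hx⟩
      · exact Or.inr ⟨e, List.mem_cons_of_mem el he, h⟩
    · rintro (hx | ⟨e, he, h⟩)
      · exact Or.inl (Or.inl hx)
      · rcases List.mem_cons.mp he with rfl | het
        · exact Or.inl (Or.inr h)
        · exact Or.inr ⟨e, het, h⟩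

theorem pvNext_mem (reps : List (String × String)) (dest : String) (dist : PySem.Dict String Int)
    (frontier : PySem.Set String) (x : String) :
    x ∈ pvNext reps dest dist frontier ↔
      ∃ el ∈ frontier, x ∈ mutate_with_reps el reps ∧ x.toList.length ≤ dest.toList.length ∧
        dist.contains x = false := by
  unfold pvNext
  rw [pvNext_fold_mem]
  simp [PySem.Set.empty]

-- characterization of a finished BFS dictionary
def pvChar (reps : List (String × String)) (dest : String) (G : PySem.Dict String Int) : Prop :=
  (∀ (j : Nat) (s : String), s ∈ pvF reps dest j → G.get? s = some (j : Int)) ∧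
  (∀ s : String, (∀ j : Nat, s ∉ pvF reps dest j) → G.get? s = none)

-- loop invariant of B (d = number of completed rounds)
def pvBI (reps : List (String × String)) (dest : String) (dist : PySem.Dict String Int)
    (frontier : PySem.Set String) (step : Int) (d : Nat) : Prop :=
  step = (d : Int) ∧ frontier.toFinset = pvF reps dest d ∧
  (∀ (j : Nat) (s : String), j ≤ d → s ∈ pvF reps dest j → dist.get? s = some (j : Int)) ∧
  (∀ s : String, s ∉ pvV reps dest d → dist.get? s = none)

theorem pvBI_contains (reps : List (String × String)) (dest : String)
    {dist : PySem.Dict String Int} {frontier : PySem.Set String} {step : Int} {d : Nat}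
    (h : pvBI reps dest dist frontier step d) (x : String) :
    dist.contains x = false ↔ x ∉ pvV reps dest d := by
  rw [PySem.Dict.contains_eq_isSome_get?]
  constructor
  · intro hc hv
    obtain ⟨j, hj, hsj⟩ := (pvV_mem_iff reps dest d x).mp hv
    rw [h.2.2.1 j x hj hsj] at hc
    simp at hc
  · intro hv
    rw [h.2.2.2 x hv]
    rfl

theorem pvNbrs_mem (reps : List (String × String)) (dest : String) (a x : String) :
    x ∈ pvNbrs reps dest a ↔ x ∈ mutate_with_reps a reps ∧ x.toList.length ≤ dest.toList.length := by
  unfold pvNbrs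
  rw [List.mem_toFinset, List.mem_filter]
  simp

theorem pvLoopB_char (reps : List (String × String)) (dest : String) :
    ∀ (dist : PySem.Dict String Int) (frontier : PySem.Set String) (step : Int)
      (h : pvKInv dest dist),
    (∃ d, pvBI reps dest dist frontier step d) →
    pvChar reps dest (pvLoopB reps dest dist frontier step h) := by
  intro dist frontier step h
  induction dist, frontier, step, h using pvLoopB.induct (reps := reps) (dest := dest) with
  | case1 dist step h =>
    rintro ⟨d, hstep, hfr, hc1, hc2⟩
    rw [pvLoopB, dif_pos rfl]
    have hFd : pvF reps dest d = ∅ := by rw [← hfr]; simp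
    constructor
    · intro j s hs
      by_cases hj : j ≤ d
      · exact hc1 j s hj hs
      · rw [pvF_empty_ge reps dest hFd j (by omega)] at hs
        simp at hs
    · intro s hs
      apply hc2
      rw [pvV_mem_iff]
      rintro ⟨j, hj, hsj⟩
      exact hs j hsj
  | case2 dist frontier step h hfr nxt hn hkey ih =>
    rintro ⟨d, hstep, hfr2, hc1, hc2⟩
    rw [pvLoopB, dif_neg hfr]
    apply ih
    have hBI : pvBI reps dest dist frontier step d := ⟨hstep, hfr2, hc1, hc2⟩
    have hmemnxt : ∀ x, x ∈ pvNext reps dest dist frontier ↔ x ∈ pvF reps dest (d + 1) := by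
      intro x
      rw [pvNext_mem, pvF_succ, Finset.mem_sdiff, Finset.mem_biUnion]
      constructor
      · rintro ⟨el, hel, hmut, hlen, hcon⟩
        refine ⟨⟨el, ?_, (pvNbrs_mem reps dest el x).mpr ⟨hmut, hlen⟩⟩, ?_⟩
        · rw [← hfr2, List.mem_toFinset] at *; exact hel
        · exact (pvBI_contains reps dest hBI x).mp hcon
      · rintro ⟨⟨el, hel, hnb⟩, hv⟩
        obtain ⟨hmut, hlen⟩ := (pvNbrs_mem reps dest el x).mp hnb
        refine ⟨el, ?_, hmut, hlen, (pvBI_contains reps dest hBI x).mpr hv⟩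
        rw [← hfr2, List.mem_toFinset] at hel; exact hel
    have hdisj : ∀ x, x ∈ pvNext reps dest dist frontier → x ∉ pvV reps dest d := by
      intro x hx
      have := (hmemnxt x).mp hx
      rw [pvF_succ, Finset.mem_sdiff] at this
      exact this.2
    have hget : ∀ s, (List.foldl (fun d m => d.insert m (step + 1)) dist
        (pvNext reps dest dist frontier)).get? s
        = if s ∈ pvNext reps dest dist frontier then some (step + 1) else dist.get? s :=
      fun s => pvGet?_foldl_insert_const (step + 1) (pvNext reps dest dist frontier) dist s
    refine ⟨d + 1, ?_, ?_, ?_, ?_⟩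
    · rw [hstep]; push_cast; ring
    · ext x
      rw [List.mem_toFinset]
      exact hmemnxt x
    · intro j s hj hs
      rw [hget]
      by_cases hjd : j ≤ d
      · have hsv : s ∈ pvV reps dest d :=
          pvV_le_mono reps dest hjd (pvF_subset_V reps dest j hs)
        rw [if_neg (fun hc => hdisj s hc hsv)]
        exact hc1 j s hjd hs
      · have hj1 : j = d + 1 := by omega
        subst hj1
        rw [if_pos ((hmemnxt s).mpr hs), hstep]
        push_cast; ring_nf
    · intro s hs
      rw [hget]
      have hs1 : s ∉ pvV reps dest d := fun hc => hs (pvV_mono reps dest d hc)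
      have hs2 : s ∉ pvF reps dest (d + 1) := by
        rw [pvV_succ] at hs
        intro hc
        exact hs (Finset.mem_union_right _ hc)
      rw [if_neg (fun hc => hs2 ((hmemnxt s).mp hc))]
      exact hc2 s hs1

theorem pvLenOK_iff (rep dest : String) :
    ¬ (PySem.Str.len rep > PySem.Str.len dest) ↔ rep.toList.length ≤ dest.toList.length := by
  rw [not_lt, PySem.Str.len_eq, PySem.Str.len_eq]
  exact ⟨fun h => by exact_mod_cast h, fun h => by exact_mod_cast h⟩

theorem pvContains_false_iff (res : PySem.Dict String Int) (s : String) :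
    res.contains s = false ↔ res.get? s = none := by
  rw [PySem.Dict.contains_eq_isSome_get?]
  cases res.get? s <;> simp

-- what one inner `for rep in mutate_with_reps(el, reps)` pass of A does, given that every
-- stored value is at most c (which the BFS invariant provides)
theorem pvFoldA_char (dest : String) (c : Int) :
    ∀ (ms : List String), ms.Nodup → ∀ (res : PySem.Dict String Int) (q : List String),
    (∀ (s : String) (v : Int), res.get? s = some v → v ≤ c) →
    (∀ s, s ∈ ms → s.toList.length ≤ dest.toList.length → res.get? s = none →
        (ms.foldl (pvStepA dest c) (res, q)).1.get? s = some c) ∧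
    (∀ s, ¬(s ∈ ms ∧ s.toList.length ≤ dest.toList.length ∧ res.get? s = none) →
        (ms.foldl (pvStepA dest c) (res, q)).1.get? s = res.get? s) ∧
    (ms.foldl (pvStepA dest c) (res, q)).2
      = q ++ ms.filter (fun s => decide (s.toList.length ≤ dest.toList.length) && !res.contains s) := by
  intro ms
  induction ms with
  | nil =>
    intro _ res q _
    refine ⟨fun s hs => by simp at hs, fun s _ => rfl, by simp⟩
  | cons m t ih =>
    intro hnd res q hval
    have hmt : m ∉ t := (List.nodup_cons.mp hnd).1
    have htnd : t.Nodup := (List.nodup_cons.mp hnd).2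
    simp only [List.foldl_cons]
    by_cases hL : PySem.Str.len m > PySem.Str.len dest
    · -- too long: skipped
      have hstep : pvStepA dest c (res, q) m = (res, q) := by unfold pvStepA; rw [if_pos hL]
      rw [hstep]
      obtain ⟨ih1, ih2, ih3⟩ := ih htnd res q hval
      have hmlen : ¬ m.toList.length ≤ dest.toList.length := by
        intro hc; exact (not_not.mpr hL) ((pvLenOK_iff m dest).mpr hc)
      refine ⟨?_, ?_, ?_⟩
      · intro s hs hslen hsnone
        rcases List.mem_cons.mp hs with rfl | hst
        · exact absurd hslen hmlen
        · exact ih1 s hst hslen hsnone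
      · intro s hs
        apply ih2
        intro ⟨h1, h2, h3⟩
        exact hs ⟨List.mem_cons_of_mem m h1, h2, h3⟩
      · rw [ih3, List.filter_cons, decide_eq_false hmlen]
        simp only [Bool.false_and, Bool.false_eq_true, if_false]
    · by_cases hcon : res.contains m = true
      · -- already stored (value necessarily ≤ c): skipped
        have hgm : ∃ v, res.get? m = some v := by
          have := PySem.Dict.contains_eq_isSome_get? res m
          rw [hcon] at this
          exact Option.isSome_iff_exists.mp this.symm
        obtain ⟨v, hv⟩ := hgm
        have hstep : pvStepA dest c (res, q) m = (res, q) := by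
          unfold pvStepA
          rw [if_neg hL, if_pos ⟨hcon, by rw [PySem.Dict.getD_eq_get?_getD, hv]; exact hval m v hv⟩]
        rw [hstep]
        obtain ⟨ih1, ih2, ih3⟩ := ih htnd res q hval
        refine ⟨?_, ?_, ?_⟩
        · intro s hs hslen hsnone
          rcases List.mem_cons.mp hs with rfl | hst
          · rw [hv] at hsnone; cases hsnone
          · exact ih1 s hst hslen hsnone
        · intro s hs
          apply ih2
          intro ⟨h1, h2, h3⟩
          exact hs ⟨List.mem_cons_of_mem m h1, h2, h3⟩
        · rw [ih3, List.filter_cons, hcon]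
          simp only [Bool.not_true, Bool.and_false, Bool.false_eq_true, if_false]
      · -- fresh: inserted with value c and appended to the queue
        have hcf : res.contains m = false := by cases hx : res.contains m; rfl; exact absurd hx hcon
        have hmnone : res.get? m = none := (pvContains_false_iff res m).mp hcf
        have hmlen : m.toList.length ≤ dest.toList.length := (pvLenOK_iff m dest).mp hL
        have hstep : pvStepA dest c (res, q) m = (res.insert m c, q ++ [m]) := by
          unfold pvStepA
          rw [if_neg hL, if_neg (by intro ⟨h1, _⟩; exact hcon h1)]
        rw [hstep]
        have hval' : ∀ (s : String) (v : Int), (res.insert m c).get? s = some v → v ≤ c := by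
          intro s v hs
          rw [PySem.Dict.get?_insert] at hs
          split at hs
          · cases hs; exact le_refl c
          · exact hval s v hs
        obtain ⟨ih1, ih2, ih3⟩ := ih htnd (res.insert m c) (q ++ [m]) hval'
        have hgins : ∀ s, s ≠ m → (res.insert m c).get? s = res.get? s := by
          intro s hs
          rw [PySem.Dict.get?_insert, if_neg hs]
        refine ⟨?_, ?_, ?_⟩
        · intro s hs hslen hsnone
          rcases List.mem_cons.mp hs with rfl | hst
          · rw [ih2 s (by intro ⟨h1, _, _⟩; exact hmt h1)]
            exact PySem.Dict.get?_insert_self res s c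
          · have hsm : s ≠ m := fun h => hmt (h ▸ hst)
            exact ih1 s hst hslen (by rw [hgins s hsm]; exact hsnone)
        · intro s hs
          have hsm : s ≠ m := by
            rintro rfl
            exact hs ⟨List.mem_cons_self, hmlen, hmnone⟩
          rw [ih2 s (by
            intro ⟨h1, h2, h3⟩
            rw [hgins s hsm] at h3
            exact hs ⟨List.mem_cons_of_mem m h1, h2, h3⟩)]
          exact hgins s hsm
        · rw [ih3, List.filter_cons]
          have hfilt : t.filter (fun s => decide (s.toList.length ≤ dest.toList.length)
                && !(res.insert m c).contains s)
              = t.filter (fun s => decide (s.toList.length ≤ dest.toList.length) && !res.contains s) := by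
            apply List.filter_congr
            intro s hst
            have hsm : s ≠ m := fun h => hmt (h ▸ hst)
            rw [PySem.Dict.contains_insert]
            have hbeq : (s == m) = false := beq_eq_false_iff_ne.mpr hsm
            rw [hbeq]
            simp
          rw [hfilt, decide_eq_true hmlen, hcf]
          simp only [Bool.not_false, Bool.and_self, if_true, List.append_assoc,
            List.singleton_append]

-- loop invariant of A: queue = (unprocessed part of layer d) ++ (discovered part of layer d+1)
def pvAI (reps : List (String × String)) (dest : String) (result : PySem.Dict String Int)
    (queue : List String) : Prop :=
  ∃ (d : Nat) (rem acc : List String), queue = rem ++ acc ∧ rem.Nodup ∧ acc.Nodup ∧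
    (∀ x ∈ rem, x ∈ pvF reps dest d) ∧
    acc.toFinset = ((pvF reps dest d \ rem.toFinset).biUnion (fun a => pvNbrs reps dest a))
      \ pvV reps dest d ∧
    (∀ (j : Nat) (s : String), j ≤ d → s ∈ pvF reps dest j → result.get? s = some (j : Int)) ∧
    (∀ s ∈ acc, result.get? s = some ((d : Int) + 1)) ∧
    (∀ s, s ∉ pvV reps dest d → s ∉ acc → result.get? s = none)

theorem pvAI_pop (reps : List (String × String)) (dest : String) (result : PySem.Dict String Int)
    (el : String) (REM ACC rest : List String) (d : Nat)
    (hq : rest = REM ++ ACC) (hndR : (el :: REM).Nodup) (hndA : ACC.Nodup)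
    (hsubR : ∀ x ∈ el :: REM, x ∈ pvF reps dest d)
    (hACC : ACC.toFinset = ((pvF reps dest d \ (el :: REM).toFinset).biUnion
      (fun a => pvNbrs reps dest a)) \ pvV reps dest d)
    (hc1 : ∀ (j : Nat) (s : String), j ≤ d → s ∈ pvF reps dest j → result.get? s = some (j : Int))
    (hc2 : ∀ s ∈ ACC, result.get? s = some ((d : Int) + 1))
    (hc3 : ∀ s, s ∉ pvV reps dest d → s ∉ ACC → result.get? s = none) :
    pvAI reps dest
      ((mutate_with_reps el reps).foldl (pvStepA dest (result.getD el 0 + 1)) (result, rest)).1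
      ((mutate_with_reps el reps).foldl (pvStepA dest (result.getD el 0 + 1)) (result, rest)).2 := by
  have hel : el ∈ pvF reps dest d := hsubR el List.mem_cons_self
  have hgel : result.get? el = some (d : Int) := hc1 d el (le_refl d) hel
  have hnum : result.getD el 0 = (d : Int) := by
    rw [PySem.Dict.getD_eq_get?_getD, hgel]; rfl
  rw [hnum]
  have hnonechar : ∀ x, result.get? x = none ↔ (x ∉ pvV reps dest d ∧ x ∉ ACC) := by
    intro x
    constructor
    · intro hn
      constructor
      · intro hv
        obtain ⟨j, hj, hsj⟩ := (pvV_mem_iff reps dest d x).mp hv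
        rw [hc1 j x hj hsj] at hn; cases hn
      · intro ha
        rw [hc2 x ha] at hn; cases hn
    · intro ⟨h1, h2⟩; exact hc3 x h1 h2
  have hval : ∀ (s : String) (v : Int), result.get? s = some v → v ≤ (d : Int) + 1 := by
    intro s v h
    by_cases hsv : s ∈ pvV reps dest d
    · obtain ⟨j, hj, hsj⟩ := (pvV_mem_iff reps dest d s).mp hsv
      rw [hc1 j s hj hsj] at h
      cases h
      have : (j : Int) ≤ (d : Int) := by exact_mod_cast hj
      omega
    · by_cases hsa : s ∈ ACC
      · rw [hc2 s hsa] at h; cases h; exact le_refl _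
      · rw [hc3 s hsv hsa] at h; cases h
  obtain ⟨f1, f2, f3⟩ := pvFoldA_char dest ((d : Int) + 1) (mutate_with_reps el reps)
    (mutate_with_reps_nodup el reps) result rest hval
  have hextmem : ∀ x, x ∈ (mutate_with_reps el reps).filter
      (fun s => decide (s.toList.length ≤ dest.toList.length) && !result.contains s) ↔
      (x ∈ mutate_with_reps el reps ∧ x.toList.length ≤ dest.toList.length ∧
        result.get? x = none) := by
    intro x
    rw [List.mem_filter]
    constructor
    · intro ⟨h1, h2⟩
      rw [Bool.and_eq_true, decide_eq_true_iff, Bool.not_eq_true'] at h2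
      exact ⟨h1, h2.1, (pvContains_false_iff result x).mp h2.2⟩
    · intro ⟨h1, h2, h3⟩
      refine ⟨h1, ?_⟩
      rw [Bool.and_eq_true, decide_eq_true_iff, Bool.not_eq_true']
      exact ⟨h2, (pvContains_false_iff result x).mpr h3⟩
  have helREM : el ∉ REM := (List.nodup_cons.mp hndR).1
  refine ⟨d, REM,
    ACC ++ (mutate_with_reps el reps).filter
      (fun s => decide (s.toList.length ≤ dest.toList.length) && !result.contains s),
    ?_, (List.nodup_cons.mp hndR).2, ?_, ?_, ?_, ?_, ?_, ?_⟩
  · rw [f3, hq, List.append_assoc]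
  · refine List.Nodup.append hndA ((mutate_with_reps_nodup el reps).filter _) ?_
    intro a haA haE
    have h1 := hc2 a haA
    have h2 := ((hextmem a).mp haE).2.2
    rw [h1] at h2; cases h2
  · intro x hx; exact hsubR x (List.mem_cons_of_mem el hx)
  · -- the discovered-next-layer set equation
    have hAiff : ∀ x, x ∈ ACC ↔
        ((∃ a, (a ∈ pvF reps dest d ∧ a ∉ (el :: REM).toFinset) ∧ x ∈ pvNbrs reps dest a) ∧
          x ∉ pvV reps dest d) := by
      intro x
      rw [← List.mem_toFinset, hACC]
      simp [Finset.mem_sdiff, Finset.mem_biUnion]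
    ext x
    rw [List.mem_toFinset, List.mem_append, Finset.mem_sdiff, Finset.mem_biUnion]
    constructor
    · rintro (hxA | hxE)
      · obtain ⟨⟨a, ⟨haF, haR⟩, hxa⟩, hxV⟩ := (hAiff x).mp hxA
        refine ⟨⟨a, ?_, hxa⟩, hxV⟩
        rw [Finset.mem_sdiff]
        refine ⟨haF, ?_⟩
        intro hc
        exact haR (by simp only [List.toFinset_cons, Finset.mem_insert]; exact Or.inr hc)
      · obtain ⟨hmut, hlen, hnone⟩ := (hextmem x).mp hxE
        obtain ⟨hxV, hxA⟩ := (hnonechar x).mp hnone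
        refine ⟨⟨el, ?_, (pvNbrs_mem reps dest el x).mpr ⟨hmut, hlen⟩⟩, hxV⟩
        rw [Finset.mem_sdiff]
        refine ⟨hel, ?_⟩
        rw [List.mem_toFinset]
        exact helREM
    · rintro ⟨⟨a, haRm, hxa⟩, hxV⟩
      rw [Finset.mem_sdiff, List.mem_toFinset] at haRm
      obtain ⟨haF, haR⟩ := haRm
      by_cases hxA : x ∈ ACC
      · exact Or.inl hxA
      · by_cases hae : a = el
        · subst hae
          obtain ⟨hmut, hlen⟩ := (pvNbrs_mem reps dest a x).mp hxa
          refine Or.inr ((hextmem x).mpr ⟨hmut, hlen, (hnonechar x).mpr ⟨hxV, hxA⟩⟩)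
        · exfalso
          apply hxA
          apply (hAiff x).mpr
          refine ⟨⟨a, ⟨haF, ?_⟩, hxa⟩, hxV⟩
          simp only [List.toFinset_cons, Finset.mem_insert, List.mem_toFinset]
          rintro (rfl | hc)
          · exact hae rfl
          · exact haR hc
  · intro j s hj hs
    rw [f2 s (by
      rintro ⟨_, _, h3⟩
      rw [hc1 j s hj hs] at h3; cases h3)]
    exact hc1 j s hj hs
  · intro s hs
    rcases List.mem_append.mp hs with hsA | hsE
    · rw [f2 s (by
        rintro ⟨_, _, h3⟩
        rw [hc2 s hsA] at h3; cases h3)]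
      exact hc2 s hsA
    · obtain ⟨h1, h2, h3⟩ := (hextmem s).mp hsE
      exact f1 s h1 h2 h3
  · intro s hsV hsAE
    have hsA : s ∉ ACC := fun hc => hsAE (List.mem_append.mpr (Or.inl hc))
    have hsE : s ∉ (mutate_with_reps el reps).filter
        (fun s => decide (s.toList.length ≤ dest.toList.length) && !result.contains s) :=
      fun hc => hsAE (List.mem_append.mpr (Or.inr hc))
    rw [f2 s (by
      rintro ⟨h1, h2, h3⟩
      exact hsE ((hextmem s).mpr ⟨h1, h2, h3⟩))]
    exact hc3 s hsV hsA

theorem pvLoopA_char (reps : List (String × String)) (dest : String) :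
    ∀ (result : PySem.Dict String Int) (queue : List String) (hInv : pvAInv dest result),
    pvAI reps dest result queue → pvChar reps dest (pvLoopA reps dest result queue hInv) := by
  intro result queue hInv
  induction result, queue, hInv using pvLoopA.induct (reps := reps) (dest := dest) with
  | case1 result hInv =>
    rintro ⟨d, rem, acc, hq, hndR, hndA, hsubR, hACC, hc1, hc2, hc3⟩
    rw [pvLoopA]
    obtain ⟨hrem, hacc⟩ := List.append_eq_nil_iff.mp hq.symm
    subst hrem; subst hacc
    have hFd1 : pvF reps dest (d + 1) = ∅ := by
      rw [pvF_succ]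
      have := hACC.symm
      simpa using this
    constructor
    · intro j s hs
      by_cases hj : j ≤ d
      · exact hc1 j s hj hs
      · rw [pvF_empty_ge reps dest hFd1 j (by omega)] at hs
        simp at hs
    · intro s hs
      refine hc3 s ?_ (by simp)
      rw [pvV_mem_iff]
      rintro ⟨j, hj, hsj⟩
      exact hs j hsj
  | case2 result hInv el rest numR hg hf ih =>
    rintro ⟨d, rem, acc, hq, hndR, hndA, hsubR, hACC, hc1, hc2, hc3⟩
    rw [pvLoopA]
    apply ih
    rcases rem with _ | ⟨el', REM⟩
    · -- current layer exhausted: shift to layer d+1 (the queue is exactly that layer)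
      have hacc2 : acc = el :: rest := by simpa using hq.symm
      have hACCF : acc.toFinset = pvF reps dest (d + 1) := by
        rw [pvF_succ]
        simpa using hACC
      refine pvAI_pop reps dest result el rest [] rest (d + 1) (by simp) ?_ (by simp) ?_ ?_ ?_ ?_ ?_
      · rw [← hacc2]; exact hndA
      · intro x hx
        rw [← hacc2] at hx
        have hx2 : x ∈ acc.toFinset := List.mem_toFinset.mpr hx
        rw [hACCF] at hx2
        exact hx2
      · rw [← hacc2, hACCF]
        simp
      · intro j s hj hs
        by_cases hjd : j ≤ d
        · exact hc1 j s hjd hs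
        · have : j = d + 1 := by omega
          subst this
          rw [← hACCF, List.mem_toFinset] at hs
          rw [hc2 s hs]
          push_cast; ring_nf
      · simp
      · intro s hsV _
        refine hc3 s (fun hc => hsV (pvV_mono reps dest d hc)) ?_
        rw [← List.mem_toFinset, hACCF]
        intro hc
        exact hsV (by rw [pvV_succ]; exact Finset.mem_union_right _ hc)
    · -- pop the head of the unprocessed part of layer d
      rw [List.cons_append] at hq
      obtain ⟨rfl, hrest⟩ : el' = el ∧ rest = REM ++ acc := by
        have := hq
        injection this with h1 h2
        exact ⟨h1.symm, h2⟩
      exact pvAI_pop reps dest result el' REM acc rest d hrest hndR hndA hsubR hACC hc1 hc2 hc3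

theorem pvF_zero (reps : List (String × String)) (dest : String) :
    pvF reps dest 0 = {"e"} := rfl

theorem pvV_zero (reps : List (String × String)) (dest : String) :
    pvV reps dest 0 = {"e"} := rfl

theorem pvGet?_init (s : String) :
    (PySem.Dict.mk [("e", (0 : Int))]).get? s = if "e" == s then some 0 else none := by
  rw [PySem.Dict.get?_mk_cons]
  split <;> rfl

theorem pvAI_init (reps : List (String × String)) (dest : String) :
    pvAI reps dest (PySem.Dict.mk [("e", 0)]) ["e"] := by
  refine ⟨0, ["e"], [], rfl, by simp, by simp, ?_, ?_, ?_, by simp, ?_⟩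
  · intro x hx
    rw [pvF_zero]
    simpa using hx
  · rw [pvF_zero]
    simp
  · intro j s hj hs
    have hj0 : j = 0 := by omega
    subst hj0
    rw [pvF_zero] at hs
    have hse : s = "e" := by simpa using hs
    subst hse
    rw [pvGet?_init]
    simp
  · intro s hsV _
    rw [pvV_zero] at hsV
    have hne : s ≠ "e" := by simpa using hsV
    rw [pvGet?_init, if_neg (by simpa using fun h => hne h.symm)]

theorem pvBI_init (reps : List (String × String)) (dest : String) :
    pvBI reps dest (PySem.Dict.mk [("e", 0)]) (PySem.Set.ofList ["e"]) 0 0 := by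
  refine ⟨by simp, ?_, ?_, ?_⟩
  · rw [pvF_zero]
    rfl
  · intro j s hj hs
    have hj0 : j = 0 := by omega
    subst hj0
    rw [pvF_zero] at hs
    have hse : s = "e" := by simpa using hs
    subst hse
    rw [pvGet?_init]
    simp
  · intro s hsV
    rw [pvV_zero] at hsV
    have hne : s ≠ "e" := by simpa using hsV
    rw [pvGet?_init, if_neg (by simpa using fun h => hne h.symm)]

theorem pvChar_get_eq (reps : List (String × String)) (dest : String)
    (GA GB : PySem.Dict String Int) (hA : pvChar reps dest GA) (hB : pvChar reps dest GB)
    (s : String) : GA.get? s = GB.get? s := by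
  by_cases hex : ∃ j : Nat, s ∈ pvF reps dest j
  · obtain ⟨j, hj⟩ := hex
    rw [hA.1 j s hj, hB.1 j s hj]
  · push_neg at hex
    rw [hA.2 s hex, hB.2 s hex]

theorem pv_main (reps : List (String × String)) (dest : String) :
    find_shortest_path_to reps dest = find_shortest_path_to_alt reps dest := by
  have hA := pvLoopA_char reps dest _ _ (pvAInv_init dest) (pvAI_init reps dest)
  have hB := pvLoopB_char reps dest _ _ 0 (pvKInv_init dest) ⟨0, pvBI_init reps dest⟩
  show ((pvLoopA reps dest (PySem.Dict.mk [("e", 0)]) ["e"] (pvAInv_init dest)).get? dest).getD 0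
    = ((pvLoopB reps dest (PySem.Dict.mk [("e", 0)]) (PySem.Set.ofList ["e"]) 0
        (pvKInv_init dest)).get? dest).getD 0
  rw [pvChar_get_eq reps dest _ _ hA hB dest]

-- ===== VERDICT (by name: the statement is the Claim_ definition above) =====
theorem find_shortest_path_to_spec : Claim_equal_find_shortest_path_to := by
  intro reps dest _ _
  exact pv_main reps dest
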